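-- pv_equiv track=rewrite | github.com/eliranbeatt/agent | server/app/core/rag/evaluator.py | _parse_contradictions
-- ===== SOURCE A (Python) =====
-- from typing import List, Dict, Any, Optional, Tuple
--
-- def _parse_contradictions(text: str) -> List[Dict[str, str]]:
--     """Parse contradictions from text."""
--     contradictions = []
--
--     if "CONTRADICTIONS:" in text:
--         section_start = text.find("CONTRADICTIONS:") + len("CONTRADICTIONS:")
--         section_text = text[section_start:]
--
--         # Find end of section
--         if "CONTRADICTION_SCORE:" in section_text:
--             section_text = section_text[:section_text.find("CONTRADICTION_SCORE:")]
--
--         # Simple parsing - look for patterns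
--         lines = section_text.strip().split('\n')
--         current_contradiction = {}
--
--         for line in lines:
--             line = line.strip()
--             if line.startswith('-') or line.startswith('Statement'):
--                 if current_contradiction:
--                     contradictions.append(current_contradiction)
--                     current_contradiction = {}
--
--             if 'Statement A:' in line or 'Statement:' in line:
--                 current_contradiction['statement_a'] = line.split(':', 1)[1].strip()
--             elif 'Contradicts:' in line:
--                 current_contradiction['statement_b'] = line.split(':', 1)[1].strip()
--             elif 'Type:' in line:
--                 current_contradiction['type'] = line.split(':', 1)[1].strip()
--
--         if current_contradiction:
--             contradictions.append(current_contradiction)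
--
--     return contradictions
-- ===== SOURCE B (Python) =====
-- def _parse_contradictions(text):
--     """Parse contradictions: segment the section into line groups, then parse each group."""
--     if "CONTRADICTIONS:" not in text:
--         return []
--     section_text = text[text.find("CONTRADICTIONS:") + len("CONTRADICTIONS:"):]
--     if "CONTRADICTION_SCORE:" in section_text:
--         section_text = section_text[:section_text.find("CONTRADICTION_SCORE:")]
--     lines = [l.strip() for l in section_text.strip().split('\n')]
--     groups = [[]]
--     for line in lines:
--         if line.startswith('-') or line.startswith('Statement'):
--             groups.append([line])
--         else:
--             groups[-1].append(line)
--     dicts = [_parse_group(g) for g in groups]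
--     return [d for d in dicts if d]
--
-- def _parse_group(group):
--     d = {}
--     for line in group:
--         if 'Statement A:' in line or 'Statement:' in line:
--             d['statement_a'] = line.split(':', 1)[1].strip()
--         elif 'Contradicts:' in line:
--             d['statement_b'] = line.split(':', 1)[1].strip()
--         elif 'Type:' in line:
--             d['type'] = line.split(':', 1)[1].strip()
--     return d
-- ===== Notes on version B (the rewrite author's own statement) =====
-- stated objective: alternative
-- what changed: A's single fused loop that detects group boundaries and fills the current dict in one pass is replaced by a two-stage decomposition: first segment the stripped lines into groups at boundary lines, then parse each group into a dict and keep the non-empty ones.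
import Mathlib
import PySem

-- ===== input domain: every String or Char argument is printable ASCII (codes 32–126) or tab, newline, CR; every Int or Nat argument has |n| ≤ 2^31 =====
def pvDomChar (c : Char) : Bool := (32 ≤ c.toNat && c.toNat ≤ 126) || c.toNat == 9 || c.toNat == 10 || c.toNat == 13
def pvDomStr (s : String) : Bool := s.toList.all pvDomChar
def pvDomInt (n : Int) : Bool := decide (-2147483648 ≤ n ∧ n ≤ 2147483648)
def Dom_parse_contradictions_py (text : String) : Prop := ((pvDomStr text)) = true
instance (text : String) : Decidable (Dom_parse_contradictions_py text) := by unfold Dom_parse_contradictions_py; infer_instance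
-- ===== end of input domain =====

-- B replaces A's fused boundary-detect-and-fill loop by a two-stage segment-then-parse decomposition (objective: alternative, same cost).


-- ===== PORT A =====
-- shared plumbing, identical in both Pythons: section extraction and the per-line field assignment
def pvLines (text : String) : List String :=
  let sectionStart : Int := PySem.Str.find text "CONTRADICTIONS:" + 15
  let sectionText : String := PySem.Str.slice text (some sectionStart) none
  let sectionText : String :=
    if PySem.Str.isIn "CONTRADICTION_SCORE:" sectionText then
      PySem.Str.slice sectionText none (some (PySem.Str.find sectionText "CONTRADICTION_SCORE:"))
    else sectionText
  (PySem.Str.split? (PySem.Str.strip sectionText) "\n").getD []  -- sep ≠ "", so split? is some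

-- line.split(':', 1)[1].strip() ; the [1] is guarded by ':' ∈ line at every call site, so getD is exact there
def pvAfterColon (line : String) : String :=
  PySem.Str.strip (((PySem.Str.splitMax? line ":" 1).getD []).getD 1 "")

def pvField (line : String) (d : PySem.Dict String String) : PySem.Dict String String :=
  if PySem.Str.isIn "Statement A:" line || PySem.Str.isIn "Statement:" line then
    d.insert "statement_a" (pvAfterColon line)
  else if PySem.Str.isIn "Contradicts:" line then
    d.insert "statement_b" (pvAfterColon line)
  else if PySem.Str.isIn "Type:" line then
    d.insert "type" (pvAfterColon line)
  else d

def pvIsBoundary (line : String) : Bool :=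
  PySem.Str.startswith line "-" || PySem.Str.startswith line "Statement"

-- A: one fused loop carrying (contradictions, current_contradiction)
def parse_contradictions_py (text : String) : List (List (String × String)) :=
  if PySem.Str.isIn "CONTRADICTIONS:" text then
    let st := (pvLines text).foldl
      (fun (st : List (PySem.Dict String String) × PySem.Dict String String) raw =>
        let line := PySem.Str.strip raw
        let st := if pvIsBoundary line then
            (if st.2.items.isEmpty then st else (st.1 ++ [st.2], PySem.Dict.empty))
          else st
        (st.1, pvField line st.2))
      ([], PySem.Dict.empty)
    let cs := if st.2.items.isEmpty then st.1 else st.1 ++ [st.2]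
    cs.map (·.items)
  else []

-- ===== PORT B =====
def pvParseGroup (g : List String) : PySem.Dict String String :=
  g.foldl (fun d line => pvField line d) PySem.Dict.empty

-- B: stage 1 segments the stripped lines into groups, stage 2 parses each group
def parse_contradictions_py_alt (text : String) : List (List (String × String)) :=
  if PySem.Str.isIn "CONTRADICTIONS:" text then
    let lines := (pvLines text).map PySem.Str.strip
    let groups := lines.foldl
      (fun (gs : List (List String)) line =>
        if pvIsBoundary line then gs ++ [[line]]
        else gs.dropLast ++ [(gs.getLast?.getD []) ++ [line]])
      [[]]
    let dicts := groups.map pvParseGroup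
    (dicts.filter (fun d => !d.items.isEmpty)).map (·.items)
  else []

-- ===== PRECONDITION & SPEC =====
def Spec_parse_contradictions_py (text : String) (out : List (List (String × String))) : Prop := out = parse_contradictions_py_alt text
instance (text : String) (out : List (List (String × String))) : Decidable (Spec_parse_contradictions_py text out) := by unfold Spec_parse_contradictions_py; infer_instance

-- ===== CLAIM (what is proved, stated in full; the proofs are below) =====
def Claim_equal_parse_contradictions_py : Prop := ∀ (text : String), Dom_parse_contradictions_py text → Spec_parse_contradictions_py text (parse_contradictions_py text)

-- ===== LEMMAS AND PROOFS =====
-- abbreviations for the two loop bodies (proof-side only)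
def pvAStep (st : List (PySem.Dict String String) × PySem.Dict String String) (line : String) :
    List (PySem.Dict String String) × PySem.Dict String String :=
  let st := if pvIsBoundary line then
      (if st.2.items.isEmpty then st else (st.1 ++ [st.2], PySem.Dict.empty))
    else st
  (st.1, pvField line st.2)

def pvGStep (gs : List (List String)) (line : String) : List (List String) :=
  if pvIsBoundary line then gs ++ [[line]]
  else gs.dropLast ++ [(gs.getLast?.getD []) ++ [line]]

def pvFinish (st : List (PySem.Dict String String) × PySem.Dict String String) :
    List (PySem.Dict String String) :=
  if st.2.items.isEmpty then st.1 else st.1 ++ [st.2]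

theorem pvGStep_local (ls : List String) (done : List (List String)) (cur : List String) :
    ls.foldl pvGStep (done ++ [cur]) = done ++ ls.foldl pvGStep [cur] := by
  induction ls generalizing done cur with
  | nil => rfl
  | cons l ls ih =>
    rw [List.foldl_cons, List.foldl_cons]
    cases h : pvIsBoundary l
    · have e1 : pvGStep (done ++ [cur]) l = done ++ [cur ++ [l]] := by
        simp [pvGStep, h]
      have e2 : pvGStep [cur] l = [cur ++ [l]] := by
        simp [pvGStep, h, List.dropLast]
      rw [e1, e2]
      exact ih done (cur ++ [l])
    · have e1 : pvGStep (done ++ [cur]) l = (done ++ [cur]) ++ [[l]] := by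
        simp [pvGStep, h]
      have e2 : pvGStep [cur] l = [cur] ++ [[l]] := by
        simp [pvGStep, h]
      rw [e1, e2, ih (done ++ [cur]) [l], ih [cur] [l]]
      simp

theorem pvEmpty_eq (d : PySem.Dict String String) (h : d.items.isEmpty = true) :
    d = PySem.Dict.empty := by
  apply PySem.Dict.ext
  simpa [List.isEmpty_iff] using h

theorem pvParseGroup_concat (g : List String) (l : String) :
    pvParseGroup (g ++ [l]) = pvField l (pvParseGroup g) := by
  simp [pvParseGroup, List.foldl_append]

theorem pvMain (ls : List String) (cs : List (PySem.Dict String String)) (g : List String) :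
    pvFinish (ls.foldl pvAStep (cs, pvParseGroup g)) =
      cs ++ ((ls.foldl pvGStep [g]).map pvParseGroup).filter (fun d => !d.items.isEmpty) := by
  induction ls generalizing cs g with
  | nil =>
    simp only [List.foldl_nil, pvFinish, List.map_cons, List.map_nil, List.filter]
    by_cases h : (pvParseGroup g).items.isEmpty <;> simp [h]
  | cons l ls ih =>
    rw [List.foldl_cons, List.foldl_cons]
    cases hb : pvIsBoundary l
    · have hA : pvAStep (cs, pvParseGroup g) l = (cs, pvParseGroup (g ++ [l])) := by
        simp [pvAStep, hb, pvParseGroup_concat]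
      have hG : pvGStep [g] l = [g ++ [l]] := by
        simp [pvGStep, hb, List.dropLast]
      rw [hA, hG]
      exact ih cs (g ++ [l])
    · have hG : pvGStep [g] l = [g] ++ [[l]] := by simp [pvGStep, hb]
      cases he : (pvParseGroup g).items.isEmpty
      · have hA : pvAStep (cs, pvParseGroup g) l
            = (cs ++ [pvParseGroup g], pvParseGroup [l]) := by
          simp [pvAStep, hb, he]
          rfl
        rw [hA, ih (cs ++ [pvParseGroup g]) [l], hG, pvGStep_local]
        simp [he]
      · have hg : pvParseGroup g = PySem.Dict.empty := pvEmpty_eq _ he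
        have hA : pvAStep (cs, pvParseGroup g) l = (cs, pvParseGroup [l]) := by
          simp only [pvAStep, hb, he, if_true]
          rw [hg]
          rfl
        rw [hA, ih cs [l], hG, pvGStep_local]
        simp [he]

-- ===== VERDICT (by name: the statement is the Claim_ definition above) =====
theorem parse_contradictions_py_spec : Claim_equal_parse_contradictions_py := by
  intro text _
  show parse_contradictions_py text = parse_contradictions_py_alt text
  unfold parse_contradictions_py parse_contradictions_py_alt
  by_cases h : PySem.Str.isIn "CONTRADICTIONS:" text
  case neg => rw [if_neg h, if_neg h]
  rw [if_pos h, if_pos h]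
  have h1 : ∀ (st : List (PySem.Dict String String) × PySem.Dict String String),
      (pvLines text).foldl
        (fun st raw =>
          let line := PySem.Str.strip raw
          let st := if pvIsBoundary line then
              (if st.2.items.isEmpty then st else (st.1 ++ [st.2], PySem.Dict.empty))
            else st
          (st.1, pvField line st.2)) st
      = ((pvLines text).map PySem.Str.strip).foldl pvAStep st := by
    intro st
    rw [List.foldl_map]
    rfl
  rw [h1]
  dsimp only
  have := pvMain ((pvLines text).map PySem.Str.strip) [] []
  simp only [pvParseGroup, List.foldl_nil] at this
  rw [show (if (((pvLines text).map PySem.Str.strip).foldl pvAStep ([], PySem.Dict.empty)).2.items.isEmpty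
        then (((pvLines text).map PySem.Str.strip).foldl pvAStep ([], PySem.Dict.empty)).1
        else (((pvLines text).map PySem.Str.strip).foldl pvAStep ([], PySem.Dict.empty)).1
          ++ [(((pvLines text).map PySem.Str.strip).foldl pvAStep ([], PySem.Dict.empty)).2])
      = pvFinish (((pvLines text).map PySem.Str.strip).foldl pvAStep ([], PySem.Dict.empty)) from rfl,
    this]
  have h2 : ∀ gs : List (List String),
      ((pvLines text).map PySem.Str.strip).foldl
        (fun (gs : List (List String)) line =>
          if pvIsBoundary line then gs ++ [[line]]
          else gs.dropLast ++ [(gs.getLast?.getD []) ++ [line]]) gs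
      = ((pvLines text).map PySem.Str.strip).foldl pvGStep gs := by
    intro gs; rfl
  rw [h2]
  simp
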